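-- pv_equiv track=rewrite | github.com/phbrgnomo/Analise-financeira-B3 | src/main.py | _aggregate_run_results
-- ===== SOURCE A (Python) =====
-- def _aggregate_run_results(
--     results: list[dict[str, object]],
-- ) -> tuple[str, int, int, int, int]:
--     """Retorna status agregado, código de saída e contagens dos resultados."""
--
--     success_count = sum(r.get("status") == "success" for r in results)
--     warning_count = sum(r.get("status") == "warning" for r in results)
--     failure_count = sum(r.get("status") == "failure" for r in results)
--
--     status = "success"
--     if failure_count:
--         status = "failure"
--     elif warning_count:
--         status = "warning"
--
--     if status == "success":
--         exit_code = 0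
--     elif status == "warning":
--         exit_code = 1
--     else:
--         exit_code = 2
--
--     return status, exit_code, success_count, warning_count, failure_count
-- ===== SOURCE B (Python) =====
-- def _aggregate_run_results(results):
--     """One pass: tally statuses in a single loop, then derive status/exit_code together."""
--     success_count = warning_count = failure_count = 0
--     for r in results:
--         s = r.get("status")
--         if s == "success":
--             success_count += 1
--         elif s == "warning":
--             warning_count += 1
--         elif s == "failure":
--             failure_count += 1
--     if failure_count:
--         status, exit_code = "failure", 2
--     elif warning_count:
--         status, exit_code = "warning", 1
--     else:
--         status, exit_code = "success", 0
--     return status, exit_code, success_count, warning_count, failure_count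
-- ===== Notes on version B (the rewrite author's own statement) =====
-- stated objective: simpler
-- what changed: Replaces A's three separate generator-sum scans over results by one loop tallying all three status counts at once, and merges the status/exit_code derivation into a single branch chain.
import Mathlib
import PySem

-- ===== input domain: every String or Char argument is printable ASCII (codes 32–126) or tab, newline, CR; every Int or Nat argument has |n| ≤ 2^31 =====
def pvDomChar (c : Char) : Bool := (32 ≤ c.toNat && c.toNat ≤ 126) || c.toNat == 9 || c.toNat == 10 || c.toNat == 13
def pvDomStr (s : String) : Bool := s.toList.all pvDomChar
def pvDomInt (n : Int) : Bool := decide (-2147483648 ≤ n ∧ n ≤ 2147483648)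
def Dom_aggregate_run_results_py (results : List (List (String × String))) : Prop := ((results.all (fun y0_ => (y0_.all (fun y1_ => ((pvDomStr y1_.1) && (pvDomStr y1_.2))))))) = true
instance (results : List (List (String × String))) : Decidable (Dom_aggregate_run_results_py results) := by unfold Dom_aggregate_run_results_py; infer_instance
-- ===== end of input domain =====

-- ===== PORT A =====
-- A: three separate 0/1-sum passes over results, then derive status then exit_code.
def aggregate_run_results_py (results : List (List (String × String))) : String × Int × Int × Int × Int :=
  let success_count : Int :=
    results.foldl (fun acc r => acc + (if (PySem.Dict.ofList r).get? "status" = some "success" then 1 else 0)) 0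
  let warning_count : Int :=
    results.foldl (fun acc r => acc + (if (PySem.Dict.ofList r).get? "status" = some "warning" then 1 else 0)) 0
  let failure_count : Int :=
    results.foldl (fun acc r => acc + (if (PySem.Dict.ofList r).get? "status" = some "failure" then 1 else 0)) 0
  let status : String :=
    if failure_count ≠ 0 then "failure"
    else if warning_count ≠ 0 then "warning"
    else "success"
  let exit_code : Int :=
    if status = "success" then 0
    else if status = "warning" then 1
    else 2
  (status, exit_code, success_count, warning_count, failure_count)

-- ===== PORT B =====
-- B: one pass tallying all three counts, then one merged branch chain for (status, exit_code).
def aggregate_run_results_py_alt (results : List (List (String × String))) : String × Int × Int × Int × Int :=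
  let counts : Int × Int × Int :=
    results.foldl (fun (acc : Int × Int × Int) r =>
      let s := (PySem.Dict.ofList r).get? "status"
      if s = some "success" then (acc.1 + 1, acc.2.1, acc.2.2)
      else if s = some "warning" then (acc.1, acc.2.1 + 1, acc.2.2)
      else if s = some "failure" then (acc.1, acc.2.1, acc.2.2 + 1)
      else acc) (0, 0, 0)
  let sc := counts.1
  let wc := counts.2.1
  let fc := counts.2.2
  if fc ≠ 0 then ("failure", 2, sc, wc, fc)
  else if wc ≠ 0 then ("warning", 1, sc, wc, fc)
  else ("success", 0, sc, wc, fc)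

-- ===== PRECONDITION & SPEC =====
def Spec_aggregate_run_results_py (results : List (List (String × String))) (out : String × Int × Int × Int × Int) : Prop := out = aggregate_run_results_py_alt results
instance (results : List (List (String × String))) (out : String × Int × Int × Int × Int) : Decidable (Spec_aggregate_run_results_py results out) := by unfold Spec_aggregate_run_results_py; infer_instance

-- ===== CLAIM (what is proved, stated in full; the proofs are below) =====
def Claim_equal_aggregate_run_results_py : Prop := ∀ (results : List (List (String × String))), Dom_aggregate_run_results_py results → Spec_aggregate_run_results_py results (aggregate_run_results_py results)

-- ===== LEMMAS AND PROOFS =====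

-- B's single triple-accumulator pass computes exactly A's three separate 0/1 sums.
theorem fold3_eq (results : List (List (String × String))) (s w f : Int) :
    results.foldl (fun (acc : Int × Int × Int) r =>
      let st := (PySem.Dict.ofList r).get? "status"
      if st = some "success" then (acc.1 + 1, acc.2.1, acc.2.2)
      else if st = some "warning" then (acc.1, acc.2.1 + 1, acc.2.2)
      else if st = some "failure" then (acc.1, acc.2.1, acc.2.2 + 1)
      else acc) (s, w, f)
    = (results.foldl (fun acc r => acc + (if (PySem.Dict.ofList r).get? "status" = some "success" then 1 else 0)) s,
       results.foldl (fun acc r => acc + (if (PySem.Dict.ofList r).get? "status" = some "warning" then 1 else 0)) w,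
       results.foldl (fun acc r => acc + (if (PySem.Dict.ofList r).get? "status" = some "failure" then 1 else 0)) f) := by
  induction results generalizing s w f with
  | nil => rfl
  | cons r rest ih =>
    simp only [List.foldl_cons]
    by_cases h1 : (PySem.Dict.ofList r).get? "status" = some "success"
    · simp [h1, ih]
    · by_cases h2 : (PySem.Dict.ofList r).get? "status" = some "warning"
      · simp [h1, h2, ih]
      · by_cases h3 : (PySem.Dict.ofList r).get? "status" = some "failure"
        · simp [h1, h2, h3, ih]
        · simp [h1, h2, h3, ih]

-- ===== VERDICT (by name: the statement is the Claim_ definition above) =====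
theorem aggregate_run_results_py_spec : Claim_equal_aggregate_run_results_py := by
  intro results _
  unfold Spec_aggregate_run_results_py aggregate_run_results_py aggregate_run_results_py_alt
  rw [fold3_eq]
  by_cases hf : results.foldl (fun acc r => acc + (if (PySem.Dict.ofList r).get? "status" = some "failure" then 1 else 0)) (0:Int) = 0
  · by_cases hw : results.foldl (fun acc r => acc + (if (PySem.Dict.ofList r).get? "status" = some "warning" then 1 else 0)) (0:Int) = 0
    · simp [hf, hw]
    · simp [hf, hw]
  · simp [hf]
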